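-- pv_equiv track=rewrite | github.com/mindspore-lab/mindocr | tools/infer/text/utils/matcher.py | deal_eb_token
-- ===== SOURCE A (Python) =====
-- def deal_eb_token(master_token):
--     replacements = {
--         "<eb></eb>": "<td></td>",
--         "<eb1></eb1>": "<td> </td>",
--         "<eb2></eb2>": "<td><b> </b></td>",
--         "<eb3></eb3>": "<td>\u2028\u2028</td>",
--         "<eb4></eb4>": "<td><sup> </sup></td>",
--         "<eb5></eb5>": "<td><b></b></td>",
--         "<eb6></eb6>": "<td><i> </i></td>",
--         "<eb7></eb7>": "<td><b><i></i></b></td>",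
--         "<eb8></eb8>": "<td><b><i> </i></b></td>",
--         "<eb9></eb9>": "<td><i></i></td>",
--         "<eb10></eb10>": "<td><b> \u2028 \u2028 </b></td>",
--     }
--     for old, new in replacements.items():
--         master_token = master_token.replace(old, new)
--     return master_token
-- ===== SOURCE B (Python) =====
-- def deal_eb_token(master_token):
--     replacements = {
--         "<eb></eb>": "<td></td>",
--         "<eb1></eb1>": "<td> </td>",
--         "<eb2></eb2>": "<td><b> </b></td>",
--         "<eb3></eb3>": "<td>\u2028\u2028</td>",
--         "<eb4></eb4>": "<td><sup> </sup></td>",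
--         "<eb5></eb5>": "<td><b></b></td>",
--         "<eb6></eb6>": "<td><i> </i></td>",
--         "<eb7></eb7>": "<td><b><i></i></b></td>",
--         "<eb8></eb8>": "<td><b><i> </i></b></td>",
--         "<eb9></eb9>": "<td><i></i></td>",
--         "<eb10></eb10>": "<td><b> \u2028 \u2028 </b></td>",
--     }
--     out = []
--     i = 0
--     n = len(master_token)
--     while i < n:
--         for old, new in replacements.items():
--             if master_token.startswith(old, i):
--                 out.append(new)
--                 i += len(old)
--                 break
--         else:
--             out.append(master_token[i])
--             i += 1
--     return "".join(out)
-- ===== Notes on version B (the rewrite author's own statement) =====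
-- stated objective: alternative
-- what changed: A makes 11 sequential full-string .replace passes (one per placeholder); B does a single left-to-right scan that at each position matches any placeholder and emits its replacement, never rescanning emitted output.
import Mathlib
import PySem

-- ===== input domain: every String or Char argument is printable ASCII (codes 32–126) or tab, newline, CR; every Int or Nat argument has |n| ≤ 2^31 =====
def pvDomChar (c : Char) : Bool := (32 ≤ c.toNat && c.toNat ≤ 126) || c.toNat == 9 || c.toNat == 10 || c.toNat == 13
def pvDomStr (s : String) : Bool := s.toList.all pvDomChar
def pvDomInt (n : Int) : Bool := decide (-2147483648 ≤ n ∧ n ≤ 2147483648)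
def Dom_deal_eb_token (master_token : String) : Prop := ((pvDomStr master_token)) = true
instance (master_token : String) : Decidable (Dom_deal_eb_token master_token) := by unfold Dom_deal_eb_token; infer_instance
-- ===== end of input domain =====

-- B replaces A's cascade of 11 full-string .replace passes by ONE left-to-right scan that
-- matches any placeholder at the current position and emits its replacement (objective: alternative).

-- ===== PORT A =====
-- the replacement dict, items in insertion order
def ebPairs : List (String × String) :=
  [ ("<eb></eb>", "<td></td>"),
    ("<eb1></eb1>", "<td> </td>"),
    ("<eb2></eb2>", "<td><b> </b></td>"),
    ("<eb3></eb3>", "<td>\u2028\u2028</td>"),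
    ("<eb4></eb4>", "<td><sup> </sup></td>"),
    ("<eb5></eb5>", "<td><b></b></td>"),
    ("<eb6></eb6>", "<td><i> </i></td>"),
    ("<eb7></eb7>", "<td><b><i></i></b></td>"),
    ("<eb8></eb8>", "<td><b><i> </i></b></td>"),
    ("<eb9></eb9>", "<td><i></i></td>"),
    ("<eb10></eb10>", "<td><b> \u2028 \u2028 </b></td>") ]

def deal_eb_token (master_token : String) : String :=
  ebPairs.foldl (fun s p => PySem.Str.replace s p.1 p.2) master_token

-- ===== PORT B =====
-- B's own copy of the replacement table, keys/values as char lists (Source B's dict)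
def ebPairsB : List (List Char × List Char) :=
  [ ("<eb></eb>".toList, "<td></td>".toList),
    ("<eb1></eb1>".toList, "<td> </td>".toList),
    ("<eb2></eb2>".toList, "<td><b> </b></td>".toList),
    ("<eb3></eb3>".toList, "<td>\u2028\u2028</td>".toList),
    ("<eb4></eb4>".toList, "<td><sup> </sup></td>".toList),
    ("<eb5></eb5>".toList, "<td><b></b></td>".toList),
    ("<eb6></eb6>".toList, "<td><i> </i></td>".toList),
    ("<eb7></eb7>".toList, "<td><b><i></i></b></td>".toList),
    ("<eb8></eb8>".toList, "<td><b><i> </i></b></td>".toList),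
    ("<eb9></eb9>".toList, "<td><i></i></td>".toList),
    ("<eb10></eb10>".toList, "<td><b> \u2028 \u2028 </b></td>".toList) ]

-- Source B's while-loop over the index, as fuel-indexed recursion on the remaining characters
-- (fuel = number of characters left; the loop advances by ≥ 1 each iteration)
def ebScanGo (L : List (List Char × List Char)) : Nat → List Char → List Char
  | _, [] => []
  | 0, c :: t => c :: t
  | fuel+1, c :: t =>
      match L.find? (fun p => p.1.isPrefixOf (c :: t)) with
      | some p => p.2 ++ ebScanGo L fuel ((c :: t).drop p.1.length)
      | none => c :: ebScanGo L fuel t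

def deal_eb_token_alt (master_token : String) : String :=
  String.ofList (ebScanGo ebPairsB master_token.toList.length master_token.toList)

-- ===== PRECONDITION & SPEC =====
def Spec_deal_eb_token (master_token : String) (out : String) : Prop := out = deal_eb_token_alt master_token
instance (master_token : String) (out : String) : Decidable (Spec_deal_eb_token master_token out) := by unfold Spec_deal_eb_token; infer_instance

-- ===== CLAIM (what is proved, stated in full; the proofs are below) =====
def Claim_equal_deal_eb_token : Prop := ∀ (master_token : String), Dom_deal_eb_token master_token → Spec_deal_eb_token master_token (deal_eb_token master_token)

-- ===== LEMMAS AND PROOFS =====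

-- proof-side abbreviation: the scan with enough fuel
def ebScan (L : List (List Char × List Char)) (s : List Char) : List Char :=
  ebScanGo L s.length s

-- definitional unfolding of one scan step (any positive fuel)
theorem ebScanGo_succ (L : List (List Char × List Char)) (f : Nat) (c : Char) (t : List Char) :
    ebScanGo L (f+1) (c :: t) =
      match L.find? (fun p => p.1.isPrefixOf (c :: t)) with
      | some p => p.2 ++ ebScanGo L f ((c :: t).drop p.1.length)
      | none => c :: ebScanGo L f t := rfl

-- `chDiff a b`: a and b differ at some position below both lengths (so neither can be a
-- prefix of the other extended by anything)
def chDiff (a b : List Char) : Bool :=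
  (List.range (min a.length b.length)).any (fun i => a[i]? != b[i]?)

theorem prefix_getElem? {a s : List Char} (h : a <+: s) {i : Nat} (hi : i < a.length) :
    a[i]? = s[i]? := by
  obtain ⟨t, rfl⟩ := h
  rw [List.getElem?_append_left hi]

theorem chDiff_spec {a b : List Char} (h : chDiff a b = true) :
    ∃ i, i < a.length ∧ i < b.length ∧ a[i]? ≠ b[i]? := by
  rcases List.any_eq_true.mp h with ⟨i, hi, hne⟩
  have hi' := List.mem_range.mp hi
  exact ⟨i, by omega, by omega, by simpa using hne⟩

theorem chDiff_not_prefix_left {a b : List Char} (h : chDiff a b = true) (z : List Char) :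
    ¬ a <+: (b ++ z) := by
  intro hpre
  obtain ⟨i, hia, hib, hne⟩ := chDiff_spec h
  have h1 : a[i]? = (b ++ z)[i]? := prefix_getElem? hpre hia
  rw [List.getElem?_append_left hib] at h1
  exact hne h1

theorem chDiff_not_prefix_right {a b : List Char} (h : chDiff a b = true) (z : List Char) :
    ¬ b <+: (a ++ z) := by
  intro hpre
  obtain ⟨i, hia, hib, hne⟩ := chDiff_spec h
  have h1 : b[i]? = (a ++ z)[i]? := prefix_getElem? hpre hib
  rw [List.getElem?_append_left hia] at h1
  exact hne h1.symm

-- clean recursive form of Python's str.replace for a nonempty pattern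
def rep1 (o v : List Char) (s : List Char) : List Char :=
  match s with
  | [] => []
  | c :: t =>
      if h : o.isPrefixOf (c :: t) = true ∧ o ≠ [] then
        v ++ rep1 o v ((c :: t).drop o.length)
      else
        c :: rep1 o v t
termination_by s.length
decreasing_by
  · simp only [List.length_drop, List.length_cons]
    have : 0 < o.length := List.length_pos_iff.mpr h.2
    omega
  · simp

theorem rep1_nil (o v : List Char) : rep1 o v [] = [] := by rw [rep1]

theorem rep1_cons_pos (o v : List Char) (c : Char) (t : List Char)
    (h : o.isPrefixOf (c :: t) = true ∧ o ≠ []) :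
    rep1 o v (c :: t) = v ++ rep1 o v ((c :: t).drop o.length) := by
  rw [rep1, dif_pos h]

theorem rep1_cons_neg (o v : List Char) (c : Char) (t : List Char)
    (h : ¬ (o.isPrefixOf (c :: t) = true ∧ o ≠ [])) :
    rep1 o v (c :: t) = c :: rep1 o v t := by
  rw [rep1, dif_neg h]

theorem replace_go_eq (o v : List Char) (ho : o ≠ []) :
    ∀ fuel l acc, l.length ≤ fuel →
      PySem.Chars.replace.go o v fuel l acc = acc.reverse ++ rep1 o v l := by
  intro fuel
  induction fuel with
  | zero =>
    intro l acc hl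
    have : l = [] := List.eq_nil_of_length_eq_zero (by omega)
    subst this
    simp [PySem.Chars.replace.go, rep1_nil]
  | succ n ih =>
    intro l acc hl
    match l with
    | [] => simp [PySem.Chars.replace.go, rep1_nil]
    | c :: t =>
      rw [PySem.Chars.replace.go]
      by_cases hp : o.isPrefixOf (c :: t) = true
      · have hlen : 0 < o.length := List.length_pos_iff.mpr ho
        have hdrop : ((c :: t).drop o.length).length ≤ n := by
          simp only [List.length_drop, List.length_cons]
          simp only [List.length_cons] at hl
          omega
        rw [if_pos hp, ih _ _ hdrop, rep1_cons_pos o v c t ⟨hp, ho⟩]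
        simp
      · rw [if_neg hp, ih t (c :: acc) (by simp at hl ⊢; omega),
          rep1_cons_neg o v c t (by simp [hp])]
        simp

theorem replace_eq_rep1 (s o v : List Char) (ho : o ≠ []) :
    PySem.Chars.replace s o v = rep1 o v s := by
  rw [PySem.Chars.replace, if_neg (by simp [List.isEmpty_iff, ho])]
  simpa using replace_go_eq o v ho s.length s [] le_rfl

-- fuel invariance of the scan
theorem ebScanGo_fuel (L : List (List Char × List Char)) (h1 : ∀ p ∈ L, p.1 ≠ []) :
    ∀ fuel l, l.length ≤ fuel → ebScanGo L fuel l = ebScan L l := by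
  intro fuel
  induction fuel using Nat.strong_induction_on with
  | _ fuel ih =>
    intro l hl
    match fuel, l with
    | 0, l =>
      have : l = [] := List.eq_nil_of_length_eq_zero (by omega)
      subst this; rfl
    | n+1, [] => rfl
    | n+1, c :: t =>
      have hr : ebScan L (c :: t) = ebScanGo L (t.length + 1) (c :: t) := by
        simp [ebScan]
      rw [hr, ebScanGo_succ, ebScanGo_succ]
      have htn : t.length ≤ n := by simp only [List.length_cons] at hl; omega
      cases hf : L.find? (fun p => p.1.isPrefixOf (c :: t)) with
      | some p =>
        have hmem : p ∈ L := List.mem_of_find?_eq_some hf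
        have hplen : 0 < p.1.length := List.length_pos_iff.mpr (h1 p hmem)
        simp only
        have hdl : (List.drop p.1.length (c :: t)).length ≤ t.length := by
          simp only [List.length_drop, List.length_cons]; omega
        rw [ih n (by omega) _ (by omega), ih t.length (by omega) _ hdl]
      | none =>
        simp only
        rw [ih n (by omega) t htn, ih t.length (by omega) t le_rfl]

theorem ebScan_nil (L : List (List Char × List Char)) : ebScan L [] = [] := rfl

theorem ebScan_cons_some (L : List (List Char × List Char)) (h1 : ∀ p ∈ L, p.1 ≠ [])
    (c : Char) (t : List Char) {p : List Char × List Char}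
    (hf : L.find? (fun p => p.1.isPrefixOf (c :: t)) = some p) :
    ebScan L (c :: t) = p.2 ++ ebScan L ((c :: t).drop p.1.length) := by
  have hr : ebScan L (c :: t) = ebScanGo L (t.length + 1) (c :: t) := by simp [ebScan]
  rw [hr, ebScanGo_succ, hf]
  simp only
  have hplen : 0 < p.1.length :=
    List.length_pos_iff.mpr (h1 p (List.mem_of_find?_eq_some hf))
  rw [ebScanGo_fuel L h1 t.length _ (by simp only [List.length_drop, List.length_cons]; omega)]

theorem ebScan_cons_none (L : List (List Char × List Char))
    (c : Char) (t : List Char)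
    (hf : L.find? (fun p => p.1.isPrefixOf (c :: t)) = none) :
    ebScan L (c :: t) = c :: ebScan L t := by
  have hr : ebScan L (c :: t) = ebScanGo L (t.length + 1) (c :: t) := by simp [ebScan]
  rw [hr, ebScanGo_succ, hf]
  rfl

theorem ebScan_empty (s : List Char) : ebScan [] s = s := by
  induction s with
  | nil => rfl
  | cons c t ih => rw [ebScan_cons_none [] c t (by simp), ih]

-- a stretch of characters on which no pattern of L can start passes through the scan
theorem ebScan_append (L : List (List Char × List Char)) (h1 : ∀ p ∈ L, p.1 ≠ []) :
    ∀ p r, (∀ i, i < p.length → ∀ q ∈ L, chDiff (p.drop i) q.1 = true) →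
      ebScan L (p ++ r) = p ++ ebScan L r := by
  intro p
  induction p with
  | nil => simp
  | cons d q ih =>
    intro r hcond
    have hnone : L.find? (fun q' => q'.1.isPrefixOf (d :: (q ++ r))) = none := by
      rw [List.find?_eq_none]
      intro q' hq'
      simp only [Bool.not_eq_true]
      rw [Bool.eq_false_iff]
      intro hpre
      have hc := hcond 0 (by simp) q' hq'
      simp only [List.drop_zero] at hc
      exact chDiff_not_prefix_right hc r
        (by rw [List.cons_append]; exact List.isPrefixOf_iff_prefix.mp hpre)
    rw [List.cons_append, ebScan_cons_none L d (q ++ r) hnone,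
      ih r (fun i hi q' hq' => by simpa using hcond (i+1) (by simp only [List.length_cons]; omega) q' hq')]
    rfl

-- same for a single replace pass
theorem rep1_append (k v : List Char) :
    ∀ p r, (∀ i, i < p.length → chDiff (p.drop i) k = true) →
      rep1 k v (p ++ r) = p ++ rep1 k v r := by
  intro p
  induction p with
  | nil => simp
  | cons d q ih =>
    intro r hcond
    rw [List.cons_append, rep1_cons_neg]
    · rw [ih r (fun i hi => by simpa using hcond (i+1) (by simp only [List.length_cons]; omega))]
      rfl
    · rintro ⟨hpre, -⟩
      have hc := hcond 0 (by simp)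
      simp only [List.drop_zero] at hc
      exact chDiff_not_prefix_right hc r
        (by rw [List.cons_append]; exact List.isPrefixOf_iff_prefix.mp hpre)

-- the scan never fabricates an occurrence of (a tail of) a pattern that the input lacked
theorem ebScan_prefix_reflect (L : List (List Char × List Char)) (h1 : ∀ p ∈ L, p.1 ≠ [])
    (k : List Char) (h5 : ∀ p ∈ L, ∀ m, m < k.length → chDiff (k.drop m) p.2 = true) :
    ∀ n t, t.length ≤ n → ∀ m, (k.drop m) <+: (ebScan L t) → (k.drop m) <+: t := by
  intro n
  induction n with
  | zero =>
    intro t ht m h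
    have : t = [] := List.eq_nil_of_length_eq_zero (by omega)
    subst this
    simpa [ebScan_nil] using h
  | succ n ih =>
    intro t ht m h
    by_cases hm : m < k.length
    · match t with
      | [] => simpa [ebScan_nil] using h
      | c :: t' =>
        cases hf : L.find? (fun p => p.1.isPrefixOf (c :: t')) with
        | some p =>
          rw [ebScan_cons_some L h1 c t' hf] at h
          exact absurd h (chDiff_not_prefix_left (h5 p (List.mem_of_find?_eq_some hf) m hm) _)
        | none =>
          rw [ebScan_cons_none L c t' hf] at h
          have hdm : k.drop m = k[m] :: k.drop (m+1) := List.drop_eq_getElem_cons hm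
          rw [hdm] at h ⊢
          rcases (List.cons_prefix_cons.mp h) with ⟨rfl, htail⟩
          exact List.cons_prefix_cons.mpr ⟨rfl,
            ih t' (by simp only [List.length_cons] at ht; omega) (m+1) htail⟩
    · have hnil : k.drop m = [] := List.drop_eq_nil_of_le (by omega)
      rw [hnil]
      exact List.nil_prefix

-- MAIN STEP: one more sequential replace pass on top of the scan of the earlier pairs
-- equals the scan of the extended pair list
theorem ebStep (L : List (List Char × List Char)) (k v : List Char) (hk : k ≠ [])
    (h1 : ∀ p ∈ L, p.1 ≠ [])
    (h3 : ∀ m, m < k.length → 0 < m → ∀ p ∈ L, chDiff (k.drop m) p.1 = true)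
    (h4 : ∀ p ∈ L, ∀ i, i < p.2.length → chDiff (p.2.drop i) k = true)
    (h5 : ∀ p ∈ L, ∀ m, m < k.length → chDiff (k.drop m) p.2 = true) :
    ∀ n s, s.length ≤ n → rep1 k v (ebScan L s) = ebScan (L ++ [(k, v)]) s := by
  have h1' : ∀ p ∈ L ++ [(k, v)], p.1 ≠ [] := by
    intro p hp
    rcases List.mem_append.mp hp with hmem | hmem
    · exact h1 p hmem
    · simp only [List.mem_singleton] at hmem; subst hmem; exact hk
  obtain ⟨c0, k', rfl⟩ : ∃ c0 k', k = c0 :: k' := by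
    cases k with
    | nil => exact absurd rfl hk
    | cons a b => exact ⟨a, b, rfl⟩
  intro n
  induction n with
  | zero =>
    intro s hs
    have : s = [] := List.eq_nil_of_length_eq_zero (by omega)
    subst this
    simp [ebScan_nil, rep1_nil]
  | succ n ih =>
    intro s hs
    match s with
    | [] => simp [ebScan_nil, rep1_nil]
    | c :: t =>
      cases hf : L.find? (fun p => p.1.isPrefixOf (c :: t)) with
      | some p =>
        have hmem : p ∈ L := List.mem_of_find?_eq_some hf
        have hplen : 0 < p.1.length := List.length_pos_iff.mpr (h1 p hmem)
        have hf' : (L ++ [(c0 :: k', v)]).find? (fun p => p.1.isPrefixOf (c :: t)) = some p := by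
          rw [List.find?_append, hf]; rfl
        rw [ebScan_cons_some L h1 c t hf, ebScan_cons_some (L ++ [(c0 :: k', v)]) h1' c t hf',
          rep1_append (c0 :: k') v p.2 _ (fun i hi => h4 p hmem i hi),
          ih _ (by simp only [List.length_drop, List.length_cons] at hs ⊢; omega)]
      | none =>
        by_cases hkp : (c0 :: k') <+: (c :: t)
        · -- the new pattern matches here; no pair of L does
          have hf' : (L ++ [(c0 :: k', v)]).find? (fun p => p.1.isPrefixOf (c :: t))
              = some (c0 :: k', v) := by
            rw [List.find?_append, hf]
            simp [List.isPrefixOf_iff_prefix.mpr hkp]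
          rcases List.cons_prefix_cons.mp hkp with ⟨rfl, hk'⟩
          obtain ⟨r, rfl⟩ := hk'
          have hscan : ebScan L (c0 :: (k' ++ r)) = c0 :: (k' ++ ebScan L r) := by
            rw [ebScan_cons_none L c0 (k' ++ r) hf,
              ebScan_append L h1 k' r (fun i hi q hq => by
                have := h3 (i+1) (by simp only [List.length_cons]; omega) (by omega) q hq
                simpa using this)]
          rw [hscan, rep1_cons_pos (c0 :: k') v c0 (k' ++ ebScan L r)
              (by
                constructor
                · exact List.isPrefixOf_iff_prefix.mpr
                    (by rw [← List.cons_append]; exact List.prefix_append (c0 :: k') (ebScan L r))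
                · simp)]
          have hdrop : ((c0 :: k') ++ ebScan L r).drop (c0 :: k').length = ebScan L r :=
            List.drop_left
          rw [show (c0 :: (k' ++ ebScan L r)).drop (c0 :: k').length = ebScan L r from hdrop,
            ih r (by simp only [List.length_cons, List.length_append] at hs; omega),
            ebScan_cons_some (L ++ [(c0 :: k', v)]) h1' c0 (k' ++ r) hf']
          have hdrop2 : (c0 :: (k' ++ r)).drop (c0 :: k').length = r := by
            have : ((c0 :: k') ++ r).drop (c0 :: k').length = r := List.drop_left
            simpa using this
          rw [hdrop2]
        · -- no pattern matches here at all
          have hf' : (L ++ [(c0 :: k', v)]).find? (fun p => p.1.isPrefixOf (c :: t)) = none := by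
            rw [List.find?_append, hf]
            simp [List.isPrefixOf_iff_prefix, hkp]
          rw [ebScan_cons_none L c t hf, ebScan_cons_none (L ++ [(c0 :: k', v)]) c t hf',
            rep1_cons_neg]
          · rw [ih t (by simp only [List.length_cons] at hs; omega)]
          · rintro ⟨hpre, -⟩
            have hpre' : (c0 :: k') <+: c :: ebScan L t := List.isPrefixOf_iff_prefix.mp hpre
            rcases List.cons_prefix_cons.mp hpre' with ⟨rfl, htail⟩
            have hh : ((c0 :: k').drop 1) <+: ebScan L t := by simpa using htail
            have hrefl := ebScan_prefix_reflect L h1 (c0 :: k') h5 t.length t le_rfl 1 hh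
            exact hkp (List.cons_prefix_cons.mpr ⟨rfl, by simpa using hrefl⟩)


-- the 11-pass cascade, at the character level, equals the one-pass scan
theorem chars_main (s : List Char) :
    ebPairsB.foldl (fun t p => PySem.Chars.replace t p.1 p.2) s = ebScan ebPairsB s := by
  have st1 : ∀ s : List Char, rep1 "<eb></eb>".toList "<td></td>".toList (ebScan [] s) = ebScan [("<eb></eb>".toList, "<td></td>".toList)] s :=
    fun s => by
      simpa only [List.nil_append, List.cons_append] using
        ebStep [] "<eb></eb>".toList "<td></td>".toList (by decide) (by decide) (by decide) (by decide) (by decide) s.length s le_rfl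
  have st2 : ∀ s : List Char, rep1 "<eb1></eb1>".toList "<td> </td>".toList (ebScan [("<eb></eb>".toList, "<td></td>".toList)] s) = ebScan [("<eb></eb>".toList, "<td></td>".toList), ("<eb1></eb1>".toList, "<td> </td>".toList)] s :=
    fun s => by
      simpa only [List.nil_append, List.cons_append] using
        ebStep [("<eb></eb>".toList, "<td></td>".toList)] "<eb1></eb1>".toList "<td> </td>".toList (by decide) (by decide) (by decide) (by decide) (by decide) s.length s le_rfl
  have st3 : ∀ s : List Char, rep1 "<eb2></eb2>".toList "<td><b> </b></td>".toList (ebScan [("<eb></eb>".toList, "<td></td>".toList), ("<eb1></eb1>".toList, "<td> </td>".toList)] s) = ebScan [("<eb></eb>".toList, "<td></td>".toList), ("<eb1></eb1>".toList, "<td> </td>".toList), ("<eb2></eb2>".toList, "<td><b> </b></td>".toList)] s :=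
    fun s => by
      simpa only [List.nil_append, List.cons_append] using
        ebStep [("<eb></eb>".toList, "<td></td>".toList), ("<eb1></eb1>".toList, "<td> </td>".toList)] "<eb2></eb2>".toList "<td><b> </b></td>".toList (by decide) (by decide) (by decide) (by decide) (by decide) s.length s le_rfl
  have st4 : ∀ s : List Char, rep1 "<eb3></eb3>".toList "<td>\u2028\u2028</td>".toList (ebScan [("<eb></eb>".toList, "<td></td>".toList), ("<eb1></eb1>".toList, "<td> </td>".toList), ("<eb2></eb2>".toList, "<td><b> </b></td>".toList)] s) = ebScan [("<eb></eb>".toList, "<td></td>".toList), ("<eb1></eb1>".toList, "<td> </td>".toList), ("<eb2></eb2>".toList, "<td><b> </b></td>".toList), ("<eb3></eb3>".toList, "<td>\u2028\u2028</td>".toList)] s :=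
    fun s => by
      simpa only [List.nil_append, List.cons_append] using
        ebStep [("<eb></eb>".toList, "<td></td>".toList), ("<eb1></eb1>".toList, "<td> </td>".toList), ("<eb2></eb2>".toList, "<td><b> </b></td>".toList)] "<eb3></eb3>".toList "<td>\u2028\u2028</td>".toList (by decide) (by decide) (by decide) (by decide) (by decide) s.length s le_rfl
  have st5 : ∀ s : List Char, rep1 "<eb4></eb4>".toList "<td><sup> </sup></td>".toList (ebScan [("<eb></eb>".toList, "<td></td>".toList), ("<eb1></eb1>".toList, "<td> </td>".toList), ("<eb2></eb2>".toList, "<td><b> </b></td>".toList), ("<eb3></eb3>".toList, "<td>\u2028\u2028</td>".toList)] s) = ebScan [("<eb></eb>".toList, "<td></td>".toList), ("<eb1></eb1>".toList, "<td> </td>".toList), ("<eb2></eb2>".toList, "<td><b> </b></td>".toList), ("<eb3></eb3>".toList, "<td>\u2028\u2028</td>".toList), ("<eb4></eb4>".toList, "<td><sup> </sup></td>".toList)] s :=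
    fun s => by
      simpa only [List.nil_append, List.cons_append] using
        ebStep [("<eb></eb>".toList, "<td></td>".toList), ("<eb1></eb1>".toList, "<td> </td>".toList), ("<eb2></eb2>".toList, "<td><b> </b></td>".toList), ("<eb3></eb3>".toList, "<td>\u2028\u2028</td>".toList)] "<eb4></eb4>".toList "<td><sup> </sup></td>".toList (by decide) (by decide) (by decide) (by decide) (by decide) s.length s le_rfl
  have st6 : ∀ s : List Char, rep1 "<eb5></eb5>".toList "<td><b></b></td>".toList (ebScan [("<eb></eb>".toList, "<td></td>".toList), ("<eb1></eb1>".toList, "<td> </td>".toList), ("<eb2></eb2>".toList, "<td><b> </b></td>".toList), ("<eb3></eb3>".toList, "<td>\u2028\u2028</td>".toList), ("<eb4></eb4>".toList, "<td><sup> </sup></td>".toList)] s) = ebScan [("<eb></eb>".toList, "<td></td>".toList), ("<eb1></eb1>".toList, "<td> </td>".toList), ("<eb2></eb2>".toList, "<td><b> </b></td>".toList), ("<eb3></eb3>".toList, "<td>\u2028\u2028</td>".toList), ("<eb4></eb4>".toList, "<td><sup> </sup></td>".toList), ("<eb5></eb5>".toList, "<td><b></b></td>".toList)] s :=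
    fun s => by
      simpa only [List.nil_append, List.cons_append] using
        ebStep [("<eb></eb>".toList, "<td></td>".toList), ("<eb1></eb1>".toList, "<td> </td>".toList), ("<eb2></eb2>".toList, "<td><b> </b></td>".toList), ("<eb3></eb3>".toList, "<td>\u2028\u2028</td>".toList), ("<eb4></eb4>".toList, "<td><sup> </sup></td>".toList)] "<eb5></eb5>".toList "<td><b></b></td>".toList (by decide) (by decide) (by decide) (by decide) (by decide) s.length s le_rfl
  have st7 : ∀ s : List Char, rep1 "<eb6></eb6>".toList "<td><i> </i></td>".toList (ebScan [("<eb></eb>".toList, "<td></td>".toList), ("<eb1></eb1>".toList, "<td> </td>".toList), ("<eb2></eb2>".toList, "<td><b> </b></td>".toList), ("<eb3></eb3>".toList, "<td>\u2028\u2028</td>".toList), ("<eb4></eb4>".toList, "<td><sup> </sup></td>".toList), ("<eb5></eb5>".toList, "<td><b></b></td>".toList)] s) = ebScan [("<eb></eb>".toList, "<td></td>".toList), ("<eb1></eb1>".toList, "<td> </td>".toList), ("<eb2></eb2>".toList, "<td><b> </b></td>".toList), ("<eb3></eb3>".toList, "<td>\u2028\u2028</td>".toList), ("<eb4></eb4>".toList,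 "<td><sup> </sup></td>".toList), ("<eb5></eb5>".toList, "<td><b></b></td>".toList), ("<eb6></eb6>".toList, "<td><i> </i></td>".toList)] s :=
    fun s => by
      simpa only [List.nil_append, List.cons_append] using
        ebStep [("<eb></eb>".toList, "<td></td>".toList), ("<eb1></eb1>".toList, "<td> </td>".toList), ("<eb2></eb2>".toList, "<td><b> </b></td>".toList), ("<eb3></eb3>".toList, "<td>\u2028\u2028</td>".toList), ("<eb4></eb4>".toList, "<td><sup> </sup></td>".toList), ("<eb5></eb5>".toList, "<td><b></b></td>".toList)] "<eb6></eb6>".toList "<td><i> </i></td>".toList (by decide) (by decide) (by decide) (by decide) (by decide) s.length s le_rfl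
  have st8 : ∀ s : List Char, rep1 "<eb7></eb7>".toList "<td><b><i></i></b></td>".toList (ebScan [("<eb></eb>".toList, "<td></td>".toList), ("<eb1></eb1>".toList, "<td> </td>".toList), ("<eb2></eb2>".toList, "<td><b> </b></td>".toList), ("<eb3></eb3>".toList, "<td>\u2028\u2028</td>".toList), ("<eb4></eb4>".toList, "<td><sup> </sup></td>".toList), ("<eb5></eb5>".toList, "<td><b></b></td>".toList), ("<eb6></eb6>".toList, "<td><i> </i></td>".toList)] s) = ebScan [("<eb></eb>".toList, "<td></td>".toList), ("<eb1></eb1>".toList, "<td> </td>".toList), ("<eb2></eb2>".toList, "<td><b> </b></td>".toList), ("<eb3></eb3>".toList, "<td>\u2028\u2028</td>".toList), ("<eb4></eb4>".toList, "<td><sup> </sup></td>".toList), ("<eb5></eb5>".toList, "<td><b></b></td>".toList), ("<eb6></eb6>".toList, "<td><i> </i></td>".toList), ("<eb7></eb7>".toList, "<td><b><i></i></b></td>".toList)] s :=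
    fun s => by
      simpa only [List.nil_append, List.cons_append] using
        ebStep [("<eb></eb>".toList, "<td></td>".toList), ("<eb1></eb1>".toList, "<td> </td>".toList), ("<eb2></eb2>".toList, "<td><b> </b></td>".toList), ("<eb3></eb3>".toList, "<td>\u2028\u2028</td>".toList), ("<eb4></eb4>".toList, "<td><sup> </sup></td>".toList), ("<eb5></eb5>".toList, "<td><b></b></td>".toList), ("<eb6></eb6>".toList, "<td><i> </i></td>".toList)] "<eb7></eb7>".toList "<td><b><i></i></b></td>".toList (by decide) (by decide) (by decide) (by decide) (by decide) s.length s le_rfl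
  have st9 : ∀ s : List Char, rep1 "<eb8></eb8>".toList "<td><b><i> </i></b></td>".toList (ebScan [("<eb></eb>".toList, "<td></td>".toList), ("<eb1></eb1>".toList, "<td> </td>".toList), ("<eb2></eb2>".toList, "<td><b> </b></td>".toList), ("<eb3></eb3>".toList, "<td>\u2028\u2028</td>".toList), ("<eb4></eb4>".toList, "<td><sup> </sup></td>".toList), ("<eb5></eb5>".toList, "<td><b></b></td>".toList), ("<eb6></eb6>".toList, "<td><i> </i></td>".toList), ("<eb7></eb7>".toList, "<td><b><i></i></b></td>".toList)] s) = ebScan [("<eb></eb>".toList, "<td></td>".toList), ("<eb1></eb1>".toList, "<td> </td>".toList), ("<eb2></eb2>".toList, "<td><b> </b></td>".toList), ("<eb3></eb3>".toList, "<td>\u2028\u2028</td>".toList), ("<eb4></eb4>".toList, "<td><sup> </sup></td>".toList), ("<eb5></eb5>".toList, "<td><b></b></td>".toList), ("<eb6></eb6>".toList, "<td><i> </i></td>".toList), ("<eb7></eb7>".toList, "<td><b><i></i></b></td>".toList), ("<eb8></eb8>".toList, "<td><b><i> </i></b></td>".toList)] s :=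
    fun s => by
      simpa only [List.nil_append, List.cons_append] using
        ebStep [("<eb></eb>".toList, "<td></td>".toList), ("<eb1></eb1>".toList, "<td> </td>".toList), ("<eb2></eb2>".toList, "<td><b> </b></td>".toList), ("<eb3></eb3>".toList, "<td>\u2028\u2028</td>".toList), ("<eb4></eb4>".toList, "<td><sup> </sup></td>".toList), ("<eb5></eb5>".toList, "<td><b></b></td>".toList), ("<eb6></eb6>".toList, "<td><i> </i></td>".toList), ("<eb7></eb7>".toList, "<td><b><i></i></b></td>".toList)] "<eb8></eb8>".toList "<td><b><i> </i></b></td>".toList (by decide) (by decide) (by decide) (by decide) (by decide) s.length s le_rfl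
  have st10 : ∀ s : List Char, rep1 "<eb9></eb9>".toList "<td><i></i></td>".toList (ebScan [("<eb></eb>".toList, "<td></td>".toList), ("<eb1></eb1>".toList, "<td> </td>".toList), ("<eb2></eb2>".toList, "<td><b> </b></td>".toList), ("<eb3></eb3>".toList, "<td>\u2028\u2028</td>".toList), ("<eb4></eb4>".toList, "<td><sup> </sup></td>".toList), ("<eb5></eb5>".toList, "<td><b></b></td>".toList), ("<eb6></eb6>".toList, "<td><i> </i></td>".toList), ("<eb7></eb7>".toList, "<td><b><i></i></b></td>".toList), ("<eb8></eb8>".toList, "<td><b><i> </i></b></td>".toList)] s) = ebScan [("<eb></eb>".toList, "<td></td>".toList), ("<eb1></eb1>".toList, "<td> </td>".toList), ("<eb2></eb2>".toList, "<td><b> </b></td>".toList), ("<eb3></eb3>".toList, "<td>\u2028\u2028</td>".toList), ("<eb4></eb4>".toList, "<td><sup> </sup></td>".toList), ("<eb5></eb5>".toList, "<td><b></b></td>".toList), ("<eb6></eb6>".toList, "<td><i> </i></td>".toList), ("<eb7></eb7>".toList, "<td><b><i></i></b></td>".toList), ("<eb8></eb8>".toList, "<td><b><i> </i></b></td>".toList),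 ("<eb9></eb9>".toList, "<td><i></i></td>".toList)] s :=
    fun s => by
      simpa only [List.nil_append, List.cons_append] using
        ebStep [("<eb></eb>".toList, "<td></td>".toList), ("<eb1></eb1>".toList, "<td> </td>".toList), ("<eb2></eb2>".toList, "<td><b> </b></td>".toList), ("<eb3></eb3>".toList, "<td>\u2028\u2028</td>".toList), ("<eb4></eb4>".toList, "<td><sup> </sup></td>".toList), ("<eb5></eb5>".toList, "<td><b></b></td>".toList), ("<eb6></eb6>".toList, "<td><i> </i></td>".toList), ("<eb7></eb7>".toList, "<td><b><i></i></b></td>".toList), ("<eb8></eb8>".toList, "<td><b><i> </i></b></td>".toList)] "<eb9></eb9>".toList "<td><i></i></td>".toList (by decide) (by decide) (by decide) (by decide) (by decide) s.length s le_rfl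
  have st11 : ∀ s : List Char, rep1 "<eb10></eb10>".toList "<td><b> \u2028 \u2028 </b></td>".toList (ebScan [("<eb></eb>".toList, "<td></td>".toList), ("<eb1></eb1>".toList, "<td> </td>".toList), ("<eb2></eb2>".toList, "<td><b> </b></td>".toList), ("<eb3></eb3>".toList, "<td>\u2028\u2028</td>".toList), ("<eb4></eb4>".toList, "<td><sup> </sup></td>".toList), ("<eb5></eb5>".toList, "<td><b></b></td>".toList), ("<eb6></eb6>".toList, "<td><i> </i></td>".toList), ("<eb7></eb7>".toList, "<td><b><i></i></b></td>".toList), ("<eb8></eb8>".toList, "<td><b><i> </i></b></td>".toList), ("<eb9></eb9>".toList, "<td><i></i></td>".toList)] s) = ebScan [("<eb></eb>".toList, "<td></td>".toList), ("<eb1></eb1>".toList, "<td> </td>".toList), ("<eb2></eb2>".toList, "<td><b> </b></td>".toList), ("<eb3></eb3>".toList, "<td>\u2028\u2028</td>".toList), ("<eb4></eb4>".toList, "<td><sup> </sup></td>".toList), ("<eb5></eb5>".toList, "<td><b></b></td>".toList), ("<eb6></eb6>".toList, "<td><i> </i></td>".toList), ("<eb7></eb7>".toList, "<td><b><i></i></b></td>".toList),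 ("<eb8></eb8>".toList, "<td><b><i> </i></b></td>".toList), ("<eb9></eb9>".toList, "<td><i></i></td>".toList), ("<eb10></eb10>".toList, "<td><b> \u2028 \u2028 </b></td>".toList)] s :=
    fun s => by
      simpa only [List.nil_append, List.cons_append] using
        ebStep [("<eb></eb>".toList, "<td></td>".toList), ("<eb1></eb1>".toList, "<td> </td>".toList), ("<eb2></eb2>".toList, "<td><b> </b></td>".toList), ("<eb3></eb3>".toList, "<td>\u2028\u2028</td>".toList), ("<eb4></eb4>".toList, "<td><sup> </sup></td>".toList), ("<eb5></eb5>".toList, "<td><b></b></td>".toList), ("<eb6></eb6>".toList, "<td><i> </i></td>".toList), ("<eb7></eb7>".toList, "<td><b><i></i></b></td>".toList), ("<eb8></eb8>".toList, "<td><b><i> </i></b></td>".toList), ("<eb9></eb9>".toList, "<td><i></i></td>".toList)] "<eb10></eb10>".toList "<td><b> \u2028 \u2028 </b></td>".toList (by decide) (by decide) (by decide) (by decide) (by decide) s.length s le_rfl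
  simp only [ebPairsB, List.foldl_cons, List.foldl_nil]
  rw [replace_eq_rep1 _ _ _ (by decide), replace_eq_rep1 _ _ _ (by decide), replace_eq_rep1 _ _ _ (by decide), replace_eq_rep1 _ _ _ (by decide), replace_eq_rep1 _ _ _ (by decide), replace_eq_rep1 _ _ _ (by decide), replace_eq_rep1 _ _ _ (by decide), replace_eq_rep1 _ _ _ (by decide), replace_eq_rep1 _ _ _ (by decide), replace_eq_rep1 _ _ _ (by decide), replace_eq_rep1 _ _ _ (by decide)]
  conv_lhs => rw [show s = ebScan [] s from (ebScan_empty s).symm]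
  rw [st1 _,
    st2 _,
    st3 _,
    st4 _,
    st5 _,
    st6 _,
    st7 _,
    st8 _,
    st9 _,
    st10 _,
    st11 _]

-- push String.toList through the fold of Str.replace passes
theorem fold_toList (P : List (String × String)) :
    ∀ s : String, (P.foldl (fun t p => PySem.Str.replace t p.1 p.2) s).toList =
      (P.map (fun p => (p.1.toList, p.2.toList))).foldl
        (fun t p => PySem.Chars.replace t p.1 p.2) s.toList := by
  induction P with
  | nil => intro s; rfl
  | cons p ps ih =>
    intro s
    simp only [List.map_cons, List.foldl_cons, ih, PySem.Str.toList_replace]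

theorem deal_eq (m : String) : deal_eb_token m = deal_eb_token_alt m := by
  apply String.toList_inj.mp
  show (ebPairs.foldl (fun s p => PySem.Str.replace s p.1 p.2) m).toList = _
  rw [fold_toList ebPairs m,
    show ebPairs.map (fun p => (p.1.toList, p.2.toList)) = ebPairsB from rfl,
    chars_main m.toList]
  show ebScan ebPairsB m.toList = (String.ofList (ebScanGo ebPairsB m.toList.length m.toList)).toList
  rw [String.toList_ofList]
  rfl

-- ===== VERDICT (by name: the statement is the Claim_ definition above) =====
theorem deal_eb_token_spec : Claim_equal_deal_eb_token := by
  unfold Claim_equal_deal_eb_token Spec_deal_eb_token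
  intro m _
  exact deal_eq m
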